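-- pv_equiv track=rewrite | github.com/burning-calamity/extirpation | online/amsco_transposition.py | amsco_encrypt
-- ===== SOURCE A (Python) =====
-- def _key_order(key: str) -> list[int]:
--     return sorted(range(len(key)), key=lambda i: (key[i], i))
--
-- def _cell_lengths(text_len: int, cols: int) -> list[list[int]]:
--     lengths: list[list[int]] = []
--     used = 0
--     row_start_two = False
--     while used < text_len:
--         row: list[int] = []
--         take_two = row_start_two
--         for _ in range(cols):
--             if used >= text_len:
--                 break
--             ln = 2 if take_two else 1
--             ln = min(ln, text_len - used)
--             row.append(ln)
--             used += ln
--             take_two = not take_two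
--         lengths.append(row)
--         row_start_two = not row_start_two
--     return lengths
--
-- def amsco_encrypt(plaintext: str, key: str) -> str:
--     """Encrypt using AMSCO transposition with alternating 1/2-letter cells."""
--     if not key:
--         raise ValueError('key must not be empty')
--
--     cols = len(key)
--     lengths = _cell_lengths(len(plaintext), cols)
--
--     grid: list[list[str]] = []
--     idx = 0
--     for row in lengths:
--         row_cells: list[str] = []
--         for ln in row:
--             row_cells.append(plaintext[idx:idx + ln])
--             idx += ln
--         grid.append(row_cells)
--
--     out: list[str] = []
--     for c in _key_order(key):
--         for r, row in enumerate(grid):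
--             if c < len(row):
--                 out.append(grid[r][c])
--     return ''.join(out)
-- ===== SOURCE B (Python) =====
-- def amsco_encrypt(plaintext: str, key: str) -> str:
--     """Encrypt using AMSCO transposition with alternating 1/2-letter cells."""
--     if not key:
--         raise ValueError('key must not be empty')
--
--     cols = len(key)
--     n = len(plaintext)
--     # One fused pass: slice the plaintext row by row straight into column buckets.
--     columns: list[list[str]] = [[] for _ in range(cols)]
--     pos = 0
--     row_start_two = False
--     while pos < n:
--         take_two = row_start_two
--         for j in range(cols):
--             if pos >= n:
--                 break
--             ln = min(2 if take_two else 1, n - pos)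
--             columns[j].append(plaintext[pos:pos + ln])
--             pos += ln
--             take_two = not take_two
--         row_start_two = not row_start_two
--
--     order = sorted(range(cols), key=lambda i: (key[i], i))
--     return ''.join(''.join(columns[j]) for j in order)
-- ===== Notes on version B (the rewrite author's own statement) =====
-- stated objective: alternative
-- what changed: Replaces A's three phases (cell-length table, grid of slices, ragged column read) with one fused pass that slices the plaintext row by row directly into per-column bucket lists, then joins the buckets in key order.
import Mathlib
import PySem

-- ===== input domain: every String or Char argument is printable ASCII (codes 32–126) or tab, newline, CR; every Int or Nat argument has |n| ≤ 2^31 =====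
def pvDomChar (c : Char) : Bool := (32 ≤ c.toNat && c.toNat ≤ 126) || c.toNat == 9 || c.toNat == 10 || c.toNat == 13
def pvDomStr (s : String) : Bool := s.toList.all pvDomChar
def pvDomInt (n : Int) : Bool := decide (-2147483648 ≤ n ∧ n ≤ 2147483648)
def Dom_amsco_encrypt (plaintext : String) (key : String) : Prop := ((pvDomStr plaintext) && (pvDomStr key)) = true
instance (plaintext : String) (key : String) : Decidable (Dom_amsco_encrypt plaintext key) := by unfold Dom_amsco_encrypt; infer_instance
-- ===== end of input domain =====

-- B replaces A's three phases (length table, grid of slices, ragged column read) by one fused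
-- pass slicing the plaintext straight into per-column buckets, joined in key order (alternative
-- decomposition, no speed claim).

-- ===== PORT A =====
-- _key_order(key) = sorted(range(len(key)), key=lambda i: (key[i], i)) (B computes the same sort inline; shared helper)
def pvKeyOrderA (key : List Char) : List Int :=
  PySem.List.sorted2 (PySem.List.pyRange 0 (PySem.List.len key) 1)
    (fun i => PySem.List.pyGetD key i ' ') (fun i => i) false

-- inner 'for _ in range(cols)' of _cell_lengths (k = remaining iterations)
def pvCellRowA (textLen : Int) : Nat → Int → Bool → List Int → List Int × Int
  | 0, used, _, row => (row, used)
  | k+1, used, takeTwo, row =>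
    if used ≥ textLen then (row, used)
    else
      let ln : Int := min (if takeTwo then 2 else 1) (textLen - used)
      pvCellRowA textLen k (used + ln) (!takeTwo) (row ++ [ln])

-- outer 'while used < text_len' of _cell_lengths; fuel only makes the loop total (each
-- iteration with cols ≥ 1 consumes at least one character, so textLen.toNat + 1 suffices)
def pvCellLengthsA (textLen : Int) (cols : Nat) : Nat → Int → Bool → List (List Int) → List (List Int)
  | 0, _, _, acc => acc
  | f+1, used, rowStartTwo, acc =>
    if used < textLen then
      let r := pvCellRowA textLen cols used rowStartTwo []
      pvCellLengthsA textLen cols f r.2 (!rowStartTwo) (acc ++ [r.1])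
    else acc

-- the grid-building loop: slices plaintext[idx:idx+ln] row by row, threading idx
def pvGridA (pt : List Char) (lengths : List (List Int)) : List (List (List Char)) :=
  (lengths.foldl (fun (st : List (List (List Char)) × Int) row =>
      let rc := row.foldl (fun (st2 : List (List Char) × Int) ln =>
          (st2.1 ++ [PySem.List.slice pt (some st2.2) (some (st2.2 + ln))], st2.2 + ln))
        (([] : List (List Char)), st.2)
      (st.1 ++ [rc.1], rc.2))
    (([] : List (List (List Char))), (0 : Int))).1

def amsco_encrypt (plaintext : String) (key : String) : String :=
  if key.toList.isEmpty then ""  -- Python raises ValueError('key must not be empty'); excluded by Pre_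
  else
    let pt := plaintext.toList
    let cols := key.toList.length
    let lengths := pvCellLengthsA (PySem.Str.len plaintext) cols ((PySem.Str.len plaintext).toNat + 1) 0 false []
    let grid := pvGridA pt lengths
    let out := (pvKeyOrderA key.toList).foldl (fun out c =>
        grid.foldl (fun out row =>
          if c < PySem.List.len row then out ++ [PySem.List.pyGetD row c []] else out) out) []
    String.ofList (PySem.Chars.join [] out)

-- ===== PORT B =====
-- inner 'for j in range(cols)' of B's single pass (k = remaining iterations)
def pvRowB (pt : List Char) (n : Int) : Nat → Nat → Int → Bool → List (List (List Char)) → List (List (List Char)) × Int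
  | 0, _, pos, _, columns => (columns, pos)
  | k+1, j, pos, takeTwo, columns =>
    if pos ≥ n then (columns, pos)
    else
      let ln : Int := min (if takeTwo then 2 else 1) (n - pos)
      let chunk := PySem.List.slice pt (some pos) (some (pos + ln))
      pvRowB pt n k (j+1) (pos + ln) (!takeTwo)
        (PySem.List.pySetD columns (j : Int) (PySem.List.pyGetD columns (j : Int) [] ++ [chunk]))

-- outer 'while pos < n' of B; same fuel bound as A's loop, only to make it total
def pvColsB (pt : List Char) (n : Int) (cols : Nat) : Nat → Int → Bool → List (List (List Char)) → List (List (List Char))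
  | 0, _, _, columns => columns
  | f+1, pos, rowStartTwo, columns =>
    if pos < n then
      let r := pvRowB pt n cols 0 pos rowStartTwo columns
      pvColsB pt n cols f r.2 (!rowStartTwo) r.1
    else columns

def amsco_encrypt_alt (plaintext : String) (key : String) : String :=
  if key.toList.isEmpty then ""  -- Python raises ValueError('key must not be empty'); excluded by Pre_
  else
    let pt := plaintext.toList
    let cols := key.toList.length
    let n := PySem.Str.len plaintext
    let columns := pvColsB pt n cols (n.toNat + 1) 0 false (List.replicate cols [])
    String.ofList (PySem.Chars.join []
      ((pvKeyOrderA key.toList).map (fun j => PySem.Chars.join [] (PySem.List.pyGetD columns j []))))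

-- ===== PRECONDITION & SPEC =====
-- Pre_ excludes only the empty key, on which A raises ValueError (B raises the same).
def Pre_amsco_encrypt (_plaintext : String) (key : String) : Prop := key.toList ≠ []
instance (plaintext : String) (key : String) : Decidable (Pre_amsco_encrypt plaintext key) := by unfold Pre_amsco_encrypt; infer_instance
def pvWitness_amsco_encrypt : String × String := ("attack at dawn", "cipher")

def Spec_amsco_encrypt (plaintext : String) (key : String) (out : String) : Prop := out = amsco_encrypt_alt plaintext key
instance (plaintext : String) (key : String) (out : String) : Decidable (Spec_amsco_encrypt plaintext key out) := by unfold Spec_amsco_encrypt; infer_instance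

-- ===== CLAIM (what is proved, stated in full; the proofs are below) =====
def Claim_equal_amsco_encrypt : Prop := ∀ (plaintext : String) (key : String), Dom_amsco_encrypt plaintext key → Pre_amsco_encrypt plaintext key → Spec_amsco_encrypt plaintext key (amsco_encrypt plaintext key)

-- ===== LEMMAS AND PROOFS =====

-- Specification skeleton shared by the two proofs: the lengths, the chunks and the rows of the
-- conceptual AMSCO grid, generated directly from (position, parity).
def pvLens (n : Int) : Nat → Int → Bool → List Int
  | 0, _, _ => []
  | k+1, pos, t2 =>
    if pos ≥ n then []
    else
      let ln : Int := min (if t2 then 2 else 1) (n - pos)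
      ln :: pvLens n k (pos + ln) (!t2)

def pvChunks (pt : List Char) (n : Int) : Nat → Int → Bool → List (List Char)
  | 0, _, _ => []
  | k+1, pos, t2 =>
    if pos ≥ n then []
    else
      let ln : Int := min (if t2 then 2 else 1) (n - pos)
      PySem.List.slice pt (some pos) (some (pos + ln)) :: pvChunks pt n k (pos + ln) (!t2)

def pvRows (pt : List Char) (n : Int) (cols : Nat) : Nat → Int → Bool → List (List (List Char))
  | 0, _, _ => []
  | f+1, pos, t2 =>
    if pos < n then
      pvChunks pt n cols pos t2 :: pvRows pt n cols f (pos + (pvLens n cols pos t2).sum) (!t2)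
    else []

def pvLensRows (n : Int) (cols : Nat) : Nat → Int → Bool → List (List Int)
  | 0, _, _ => []
  | f+1, pos, t2 =>
    if pos < n then
      pvLens n cols pos t2 :: pvLensRows n cols f (pos + (pvLens n cols pos t2).sum) (!t2)
    else []

-- positional append of a row's chunks into the column buckets (what B's inner loop does)
def pvApply : List (List (List Char)) → Nat → List (List Char) → List (List (List Char))
  | columns, _, [] => columns
  | columns, j, ch :: t => pvApply (columns.set j (columns.getD j [] ++ [ch])) (j+1) t

theorem pvCellRowA_eq (n : Int) (k : Nat) : ∀ (pos : Int) (t2 : Bool) (row : List Int),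
    pvCellRowA n k pos t2 row = (row ++ pvLens n k pos t2, pos + (pvLens n k pos t2).sum) := by
  induction k with
  | zero => intro pos t2 row; simp [pvCellRowA, pvLens]
  | succ k ih =>
    intro pos t2 row
    by_cases h : pos ≥ n
    · simp [pvCellRowA, pvLens, h]
    · simp only [pvCellRowA, pvLens, if_neg h]
      rw [ih]
      refine Prod.ext ?_ ?_ <;> simp <;> ring

theorem pvCellLengthsA_eq (n : Int) (cols : Nat) (f : Nat) : ∀ (pos : Int) (t2 : Bool) (acc : List (List Int)),
    pvCellLengthsA n cols f pos t2 acc = acc ++ pvLensRows n cols f pos t2 := by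
  induction f with
  | zero => intro pos t2 acc; simp [pvCellLengthsA, pvLensRows]
  | succ f ih =>
    intro pos t2 acc
    by_cases h : pos < n
    · simp only [pvCellLengthsA, pvLensRows, if_pos h]
      rw [pvCellRowA_eq, ih]
      simp
    · simp [pvCellLengthsA, pvLensRows, h]

theorem pvGridRow_eq (pt : List Char) (n : Int) (k : Nat) : ∀ (pos : Int) (t2 : Bool) (cells : List (List Char)),
    (pvLens n k pos t2).foldl (fun (st2 : List (List Char) × Int) ln =>
        (st2.1 ++ [PySem.List.slice pt (some st2.2) (some (st2.2 + ln))], st2.2 + ln)) (cells, pos)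
      = (cells ++ pvChunks pt n k pos t2, pos + (pvLens n k pos t2).sum) := by
  induction k with
  | zero => intro pos t2 cells; simp [pvLens, pvChunks]
  | succ k ih =>
    intro pos t2 cells
    by_cases h : pos ≥ n
    · simp [pvLens, pvChunks, h]
    · simp only [pvLens, pvChunks, if_neg h]
      rw [List.foldl_cons, ih]
      refine Prod.ext ?_ ?_ <;> simp <;> ring

theorem pvGridA_rows (pt : List Char) (n : Int) (cols : Nat) (f : Nat) : ∀ (pos : Int) (t2 : Bool) (gacc : List (List (List Char))),
    ((pvLensRows n cols f pos t2).foldl (fun (st : List (List (List Char)) × Int) row =>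
        let rc := row.foldl (fun (st2 : List (List Char) × Int) ln =>
            (st2.1 ++ [PySem.List.slice pt (some st2.2) (some (st2.2 + ln))], st2.2 + ln))
          (([] : List (List Char)), st.2)
        (st.1 ++ [rc.1], rc.2)) (gacc, pos)).1
      = gacc ++ pvRows pt n cols f pos t2 := by
  induction f with
  | zero => intro pos t2 gacc; simp [pvLensRows, pvRows]
  | succ f ih =>
    intro pos t2 gacc
    by_cases h : pos < n
    · simp only [pvLensRows, pvRows, if_pos h]
      rw [List.foldl_cons]
      simp only [pvGridRow_eq, List.nil_append]
      rw [ih]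
      simp
    · simp [pvLensRows, pvRows, h]

theorem pvChunks_length (pt : List Char) (n : Int) (k : Nat) : ∀ (pos : Int) (t2 : Bool),
    (pvChunks pt n k pos t2).length ≤ k := by
  induction k with
  | zero => intro pos t2; simp [pvChunks]
  | succ k ih =>
    intro pos t2
    by_cases h : pos ≥ n
    · simp [pvChunks, h]
    · simp only [pvChunks, if_neg h, List.length_cons]
      exact Nat.succ_le_succ (ih _ _)

theorem pvRowB_eq (pt : List Char) (n : Int) (k : Nat) : ∀ (j : Nat) (pos : Int) (t2 : Bool) (columns : List (List (List Char))),
    pvRowB pt n k j pos t2 columns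
      = (pvApply columns j (pvChunks pt n k pos t2), pos + (pvLens n k pos t2).sum) := by
  induction k with
  | zero => intro j pos t2 columns; simp [pvRowB, pvChunks, pvLens, pvApply]
  | succ k ih =>
    intro j pos t2 columns
    by_cases h : pos ≥ n
    · simp [pvRowB, pvChunks, pvLens, pvApply, h]
    · simp only [pvRowB, pvChunks, pvLens, if_neg h, if_pos (not_le.mp h)]
      rw [ih]
      refine Prod.ext ?_ ?_
      · simp [pvApply, PySem.List.pySetD_natCast, PySem.List.pyGetD_natCast]
      · simp; ring

theorem pvApply_length (ch : List (List Char)) : ∀ (columns : List (List (List Char))) (j : Nat),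
    (pvApply columns j ch).length = columns.length := by
  induction ch with
  | nil => intro columns j; simp [pvApply]
  | cons c t ih =>
    intro columns j
    simp only [pvApply]
    rw [ih]
    simp

theorem pvApply_getD (ch : List (List Char)) : ∀ (columns : List (List (List Char))) (j c : Nat),
    j + ch.length ≤ columns.length →
    (pvApply columns j ch).getD c [] = columns.getD c [] ++ (if j ≤ c then (ch[c-j]?).toList else []) := by
  induction ch with
  | nil => intro columns j c h; simp [pvApply]
  | cons x t ih =>
    intro columns j c h
    simp only [List.length_cons] at h
    simp only [pvApply]
    rw [ih _ _ _ (by simp only [List.length_set]; omega)]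
    by_cases hcj : c = j
    · subst hcj
      have hlt : c < columns.length := by omega
      have hset : (columns.set c (columns.getD c [] ++ [x])).getD c [] = columns.getD c [] ++ [x] := by
        rw [List.getD_eq_getElem?_getD, List.getElem?_set_self hlt]
        simp
      rw [hset]
      have h1 : ¬ (c + 1 ≤ c) := by omega
      simp [h1]
    · have hset : (columns.set j (columns.getD j [] ++ [x])).getD c [] = columns.getD c [] := by
        rw [List.getD_eq_getElem?_getD, List.getElem?_set_ne (by omega), ← List.getD_eq_getElem?_getD]
      rw [hset]
      by_cases hjc : j ≤ c
      · have h1 : j + 1 ≤ c := by omega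
        have h2 : c - j = (c - (j+1)) + 1 := by omega
        simp [hjc, h1, h2]
      · have h1 : ¬ (j + 1 ≤ c) := by omega
        simp [hjc, h1]

theorem pvColsB_length (pt : List Char) (n : Int) (cols : Nat) (f : Nat) : ∀ (pos : Int) (t2 : Bool) (columns : List (List (List Char))),
    columns.length = cols → (pvColsB pt n cols f pos t2 columns).length = cols := by
  induction f with
  | zero => intro pos t2 columns h; simpa [pvColsB] using h
  | succ f ih =>
    intro pos t2 columns h
    by_cases hlt : pos < n
    · simp only [pvColsB, if_pos hlt]
      rw [pvRowB_eq]
      exact ih _ _ _ (by rw [pvApply_length]; exact h)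
    · simpa [pvColsB, hlt] using h

theorem pvColsB_getD (pt : List Char) (n : Int) (cols : Nat) (f : Nat) : ∀ (pos : Int) (t2 : Bool) (columns : List (List (List Char))) (c : Nat),
    columns.length = cols →
    (pvColsB pt n cols f pos t2 columns).getD c []
      = columns.getD c [] ++ (pvRows pt n cols f pos t2).filterMap (fun row => row[c]?) := by
  induction f with
  | zero => intro pos t2 columns c h; simp [pvColsB, pvRows]
  | succ f ih =>
    intro pos t2 columns c h
    by_cases hlt : pos < n
    · simp only [pvColsB, pvRows, if_pos hlt]
      rw [pvRowB_eq]
      rw [ih _ _ _ _ (by rw [pvApply_length]; exact h)]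
      rw [pvApply_getD _ _ _ _ (by rw [h]; simpa using pvChunks_length pt n cols pos t2)]
      simp only [Nat.zero_le, if_pos, Nat.sub_zero, List.filterMap_cons]
      cases hx : (pvChunks pt n cols pos t2)[c]? <;> simp [hx]
    · simp [pvColsB, pvRows, hlt]

theorem pvReadA_eq (c : Int) (hc : 0 ≤ c) (grid : List (List (List Char))) : ∀ (out : List (List Char)),
    grid.foldl (fun out row =>
        if c < PySem.List.len row then out ++ [PySem.List.pyGetD row c []] else out) out
      = out ++ grid.filterMap (fun row => row[c.toNat]?) := by
  induction grid with
  | nil => intro out; simp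
  | cons row rest ih =>
    intro out
    rw [List.foldl_cons]
    by_cases h : c < PySem.List.len row
    · have hlt : c.toNat < row.length := by
        simp [PySem.List.len_eq] at h
        omega
      rw [if_pos h, ih]
      rw [PySem.List.pyGetD_eq_getElem row [] hc (by simpa [PySem.List.len_eq] using h)]
      simp [List.filterMap_cons, List.getElem?_eq_getElem hlt]
    · have hnone : row[c.toNat]? = none := by
        rw [List.getElem?_eq_none_iff]
        simp [PySem.List.len_eq] at h
        omega
      rw [if_neg h, ih]
      simp [List.filterMap_cons, hnone]

theorem pvJoinNil (xss : List (List Char)) : PySem.Chars.join [] xss = xss.flatten := by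
  induction xss with
  | nil => simp [PySem.Chars.join_nil]
  | cons x t ih =>
    cases t with
    | nil => simp [PySem.Chars.join_singleton]
    | cons y tt =>
      rw [PySem.Chars.join_cons_cons]
      simp only [List.flatten_cons]
      rw [ih]
      simp

theorem pvFlattenFlatMap (l : List Int) (f : Int → List (List Char)) :
    (l.flatMap f).flatten = l.flatMap (fun c => (f c).flatten) := by
  induction l with
  | nil => simp
  | cons a t ih => simp [List.flatMap_cons, List.flatten_append, ih]

-- ===== VERDICT (by name: the statement is the Claim_ definition above) =====
theorem amsco_encrypt_spec : Claim_equal_amsco_encrypt := by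
  intro plaintext key _ hpre
  unfold Spec_amsco_encrypt amsco_encrypt amsco_encrypt_alt
  have hkey : key.toList.isEmpty = false := by
    unfold Pre_amsco_encrypt at hpre
    exact List.isEmpty_eq_false_iff.mpr hpre
  simp only [hkey, Bool.false_eq_true, if_false]
  set pt := plaintext.toList with hpt
  set cols := key.toList.length with hcolsdef
  set n := PySem.Str.len plaintext with hn
  set F := n.toNat + 1 with hF
  set ord := pvKeyOrderA key.toList with hord
  have hmem : ∀ c ∈ ord, 0 ≤ c ∧ c < (cols : Int) := by
    intro c hc
    have h1 := (PySem.List.sorted2_perm (PySem.List.pyRange 0 (PySem.List.len key.toList) 1)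
      (fun i => PySem.List.pyGetD key.toList i ' ') (fun i => i) false).mem_iff.mp hc
    rw [PySem.List.mem_pyRange_one] at h1
    simpa [PySem.List.len_eq] using h1
  have hgrid : pvGridA pt (pvCellLengthsA n cols F 0 false []) = pvRows pt n cols F 0 false := by
    rw [pvCellLengthsA_eq]
    unfold pvGridA
    rw [List.nil_append, pvGridA_rows]
    simp
  rw [hgrid]
  set rows := pvRows pt n cols F 0 false with hrows
  set col : Int → List (List Char) := fun c => rows.filterMap (fun row => row[c.toNat]?) with hcol
  have hA : ord.foldl (fun out c =>
      rows.foldl (fun out row =>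
        if c < PySem.List.len row then out ++ [PySem.List.pyGetD row c []] else out) out) []
      = ord.flatMap col := by
    rw [PySem.List.foldl_congr_mem ord _ (fun out c => out ++ col c) []
      (fun acc c hc => pvReadA_eq c (hmem c hc).1 rows acc)]
    simpa using PySem.List.foldl_append_eq_flatMap col ord []
  rw [hA]
  set columns := pvColsB pt n cols F 0 false (List.replicate cols []) with hcolumns
  have hclen : columns.length = cols := pvColsB_length pt n cols F 0 false _ (by simp)
  have hB : ∀ c ∈ ord, PySem.List.pyGetD columns c [] = col c := by
    intro c hc
    obtain ⟨h0, hlt⟩ := hmem c hc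
    rw [PySem.List.pyGetD_eq_getElem columns [] h0 (by rw [hclen]; omega)]
    have hge : columns[c.toNat] = columns.getD c.toNat [] :=
      (List.getD_eq_getElem columns [] (by rw [hclen]; omega)).symm
    rw [hge, hcolumns, pvColsB_getD pt n cols F 0 false (List.replicate cols []) c.toNat (by simp)]
    have hrep : (List.replicate cols ([] : List (List Char))).getD c.toNat [] = [] := by
      rw [List.getD_eq_getElem?_getD, List.getElem?_replicate]
      split <;> rfl
    rw [hrep]
    simp [hcol, ← hrows]
  have hBmap : ord.map (fun c => PySem.Chars.join [] (PySem.List.pyGetD columns c []))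
      = ord.map (fun c => (col c).flatten) :=
    List.map_congr_left (fun c hc => by rw [hB c hc, pvJoinNil])
  rw [hBmap, pvJoinNil, pvJoinNil]
  congr 1
  rw [pvFlattenFlatMap, ← List.flatMap_def]
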